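-- pv_equiv track=rewrite | github.com/Lieutenant-K/Algorithm | Programmers/Algorithm Kit/Heap/Number 2/main.py | solution
-- ===== SOURCE A (Python) =====
-- import heapq
-- from collections import deque
--
-- def solution(jobs):
--     h = []
--     n = len(jobs)
--     tasks = deque(sorted(jobs))
--     end, answer = tasks.popleft()
--     end += answer
--
--     while len(tasks) > 0:
--         start, time = tasks[0]
--         if start <= end:
--             heapq.heappush(h, (time, start))
--             tasks.popleft()
--         else:
--             if len(h) > 0:
--                 t, s = heapq.heappop(h)
--                 answer += (end - s) + t
--                 end += t
--             else:
--                 answer += time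
--                 end = start + time
--                 tasks.popleft()
--     while len(h) > 0:
--         t, s = heapq.heappop(h)
--         answer += (end - s) + t
--         end += t
--     return answer//n
-- ===== SOURCE B (Python) =====
-- def solution(jobs):
--     n = len(jobs)
--     order = sorted(jobs)
--     s0, t0 = order[0]
--     now = s0 + t0
--     total = t0
--     rest = [(s, t) for s, t in order[1:]]
--     avail = []
--     while rest or avail:
--         while rest and rest[0][0] <= now:
--             s, t = rest.pop(0)
--             avail.append((t, s))
--         if avail:
--             m = min(avail)
--             avail.remove(m)
--             t, s = m
--             total += (now - s) + t
--             now += t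
--         else:
--             s, t = rest.pop(0)
--             total += t
--             now = s + t
--     return total // n
-- ===== Notes on version B (the rewrite author's own statement) =====
-- stated objective: simpler
-- what changed: Replaces A's heapq min-heap plus deque plus separate drain loop by one sorted list consumed from the front, a plain list of available jobs filled by an admit-all inner loop, and a linear min() scan, all in a single while loop.
import Mathlib
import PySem

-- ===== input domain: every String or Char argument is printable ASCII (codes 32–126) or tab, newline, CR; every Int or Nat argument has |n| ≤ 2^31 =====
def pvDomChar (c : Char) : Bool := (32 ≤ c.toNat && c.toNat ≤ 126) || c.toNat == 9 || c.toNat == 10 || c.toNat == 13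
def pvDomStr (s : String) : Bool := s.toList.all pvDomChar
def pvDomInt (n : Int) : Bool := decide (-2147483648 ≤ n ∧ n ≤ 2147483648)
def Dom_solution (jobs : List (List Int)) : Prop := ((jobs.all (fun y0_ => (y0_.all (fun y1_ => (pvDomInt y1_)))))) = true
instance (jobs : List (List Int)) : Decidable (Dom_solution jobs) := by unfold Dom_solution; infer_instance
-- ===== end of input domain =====

-- B replaces A's heapq min-heap + deque + separate drain loop by a plain list of available
-- jobs with an admit-all inner loop and a linear min scan, in one loop (objective: simpler,
-- not faster). Equivalence is about the return value; neither Python mutates its argument.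

-- shared small helpers (both Pythons take the lexicographic minimum of (time, start) pairs
-- and remove its first occurrence: heapq.heappop on A's side, min()+list.remove on B's side)
def pairLt (p q : Int × Int) : Bool := p.1 < q.1 || (p.1 == q.1 && p.2 < q.2)

-- first extremal element of a :: l under pairLt (= Python min on a nonempty tuple list)
def minPair (a : Int × Int) (l : List (Int × Int)) : Int × Int :=
  l.foldl (fun b y => if pairLt y b then y else b) a

-- remove the first occurrence (= list.remove on an element known to be present)
def removeFirst : List (Int × Int) → (Int × Int) → List (Int × Int)
  | [], _ => []
  | y :: ys, m => if y = m then ys else y :: removeFirst ys m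

theorem minPair_mem (l : List (Int × Int)) (a : Int × Int) : minPair a l = a ∨ minPair a l ∈ l := by
  induction l generalizing a with
  | nil => left; rfl
  | cons y ys ih =>
    rw [show minPair a (y :: ys) = minPair (if pairLt y a then y else a) ys from rfl]
    by_cases hp : pairLt y a
    · rw [if_pos hp]
      rcases ih y with h | h
      · right; rw [h]; exact List.mem_cons_self
      · right; exact List.mem_cons_of_mem _ h
    · rw [if_neg hp]
      rcases ih a with h | h
      · left; exact h
      · right; exact List.mem_cons_of_mem _ h

theorem removeFirst_length (l : List (Int × Int)) (m : Int × Int) (h : m ∈ l) :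
    (removeFirst l m).length + 1 = l.length := by
  induction l with
  | nil => cases h
  | cons y ys ih =>
    by_cases hy : y = m
    · simp [removeFirst, hy]
    · have hm : m ∈ ys := by cases h with | head => exact absurd rfl hy | tail _ h => exact h
      simp [removeFirst, hy, ih hm]

theorem removeFirst_cons_length_lt (x : Int × Int) (hs : List (Int × Int)) (m : Int × Int)
    (h : m = x ∨ m ∈ hs) : (removeFirst (x :: hs) m).length < (x :: hs).length := by
  have hm : m ∈ x :: hs := List.mem_cons.mpr h
  have := removeFirst_length (x :: hs) m hm
  omega

-- ===== PORT A =====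
-- heapq.heappush is modelled as appending to the heap list; heapq.heappop as removing the
-- first occurrence of the lexicographic minimum — exact on the popped VALUES and on the heap
-- as a multiset, which is all A's result depends on.

-- the final 'while len(h) > 0' drain loop of A
def aDrain (h : List (Int × Int)) (e ans : Int) : Int :=
  match h with
  | [] => ans
  | x :: hs =>
    let m := minPair x hs
    aDrain (removeFirst (x :: hs) m) (e + m.1) (ans + (e - m.2) + m.1)
termination_by h.length
decreasing_by
  exact removeFirst_cons_length_lt x hs _ (minPair_mem hs x)

-- A's main 'while len(tasks) > 0' loop (tasks, h, end, answer), then the drain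
def aLoop (tasks h : List (Int × Int)) (e ans : Int) : Int :=
  match tasks with
  | [] => aDrain h e ans
  | (s, t) :: rest =>
    if s ≤ e then aLoop rest (h ++ [(t, s)]) e ans
    else
      match h with
      | [] => aLoop rest [] (s + t) (ans + t)
      | x :: hs =>
        let m := minPair x hs
        aLoop ((s, t) :: rest) (removeFirst (x :: hs) m) (e + m.1) (ans + (e - m.2) + m.1)
termination_by 2 * tasks.length + h.length
decreasing_by
  · simp only [List.length_cons, List.length_append, List.length_nil]; omega
  · simp only [List.length_cons]; omega
  · have := removeFirst_cons_length_lt x hs (minPair x hs) (minPair_mem hs x)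
    simp only [List.length_cons] at this ⊢; omega

def toJobPair (j : List Int) : Int × Int := (PySem.List.pyGetD j 0 0, PySem.List.pyGetD j 1 0)

def solution (jobs : List (List Int)) : Int :=
  match (PySem.List.sorted jobs (fun j => j) false).map toJobPair with
  | [] => 0  -- unreachable under Pre_ (A raises IndexError on [])
  | (s, t) :: rest => PySem.Int.floordiv (aLoop rest [] (s + t) t) (jobs.length : Int)

-- ===== PORT B =====

-- B's inner 'while rest and rest[0][0] <= now' admit loop: move eligible jobs to avail
def bAdmit (now : Int) : List (Int × Int) → List (Int × Int) → List (Int × Int) × List (Int × Int)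
  | [], avail => ([], avail)
  | (s, t) :: rest, avail =>
    if s ≤ now then bAdmit now rest (avail ++ [(t, s)]) else ((s, t) :: rest, avail)

theorem bAdmit_measure (now : Int) (rest avail : List (Int × Int)) :
    2 * (bAdmit now rest avail).1.length + (bAdmit now rest avail).2.length ≤
      2 * rest.length + avail.length := by
  induction rest generalizing avail with
  | nil => simp [bAdmit]
  | cons p rest ih =>
    obtain ⟨s, t⟩ := p
    by_cases h : s ≤ now
    · have := ih (avail ++ [(t, s)])
      simp [bAdmit, h] at this ⊢; omega
    · simp [bAdmit, h]

-- B's single 'while rest or avail' loop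
def bLoop (rest avail : List (Int × Int)) (now tot : Int) : Int :=
  if rest = [] ∧ avail = [] then tot
  else
    match hba : bAdmit now rest avail with
    | (rest', x :: hs) =>
      let m := minPair x hs
      bLoop rest' (removeFirst (x :: hs) m) (now + m.1) (tot + (now - m.2) + m.1)
    | ((s, t) :: rest', []) => bLoop rest' [] (s + t) (tot + t)
    | ([], []) => tot
termination_by 2 * rest.length + avail.length
decreasing_by
  · have hb := bAdmit_measure now rest avail
    rw [hba] at hb
    have hr := removeFirst_cons_length_lt x hs (minPair x hs) (minPair_mem hs x)
    simp at hb hr ⊢; omega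
  · have hb := bAdmit_measure now rest avail
    rw [hba] at hb
    simp at hb ⊢; omega

def solution_alt (jobs : List (List Int)) : Int :=
  match (PySem.List.sorted jobs (fun j => j) false).map toJobPair with
  | [] => 0  -- unreachable under Pre_ (B raises IndexError on [])
  | (s, t) :: rest => PySem.Int.floordiv (bLoop rest [] (s + t) t) (jobs.length : Int)

-- ===== PRECONDITION & SPEC =====
-- A (and B) raise on these inputs, they are not excluded for convenience:
-- empty jobs → IndexError; a job not of the form [start, time] → ValueError at tuple unpacking.
def Pre_solution (jobs : List (List Int)) : Prop := jobs ≠ [] ∧ ∀ j ∈ jobs, j.length = 2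
instance (jobs : List (List Int)) : Decidable (Pre_solution jobs) := by unfold Pre_solution; infer_instance
def pvWitness_solution : List (List Int) := [[0, 3], [1, 9], [2, 6]]
def Spec_solution (jobs : List (List Int)) (out : Int) : Prop := out = solution_alt jobs
instance (jobs : List (List Int)) (out : Int) : Decidable (Spec_solution jobs out) := by unfold Spec_solution; infer_instance

-- ===== CLAIM (what is proved, stated in full; the proofs are below) =====
def Claim_equal_solution : Prop := ∀ (jobs : List (List Int)), Dom_solution jobs → Pre_solution jobs → Spec_solution jobs (solution jobs)

-- ===== LEMMAS AND PROOFS =====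

-- admitting one eligible job: B's inner loop makes one step
theorem bLoop_cons_le (s t now tot : Int) (r a : List (Int × Int)) (h : s ≤ now) :
    bLoop ((s, t) :: r) a now tot = bLoop r (a ++ [(t, s)]) now tot := by
  conv_lhs => rw [bLoop]
  conv_rhs => rw [bLoop]
  rw [if_neg (by simp), if_neg (by simp)]
  rw [show bAdmit now ((s, t) :: r) a = bAdmit now r (a ++ [(t, s)]) from by simp [bAdmit, h]]

-- the two loops compute the same total
theorem loops_eq (N : Nat) : ∀ (tasks h : List (Int × Int)) (e ans : Int),
    2 * tasks.length + h.length ≤ N → aLoop tasks h e ans = bLoop tasks h e ans := by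
  induction N with
  | zero =>
    intro tasks h e ans hle
    have ht : tasks = [] := by cases tasks with | nil => rfl | cons _ _ => simp at hle
    have hh : h = [] := by
      cases h with
      | nil => rfl
      | cons _ _ => simp only [List.length_cons] at hle; omega
    subst ht; subst hh
    rw [aLoop, aDrain, bLoop]
    simp
  | succ N ih =>
    intro tasks h e ans hle
    cases tasks with
    | nil =>
      cases h with
      | nil => rw [aLoop, aDrain, bLoop, if_pos ⟨rfl, rfl⟩]
      | cons x hs =>
        rw [aLoop, aDrain]
        conv_rhs => rw [bLoop]
        rw [if_neg (by simp)]
        rw [show bAdmit e [] (x :: hs) = ([], x :: hs) from rfl]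
        have hlen := removeFirst_cons_length_lt x hs (minPair x hs) (minPair_mem hs x)
        have := ih [] (removeFirst (x :: hs) (minPair x hs)) (e + (minPair x hs).1)
          (ans + (e - (minPair x hs).2) + (minPair x hs).1)
          (by simp only [List.length_nil, List.length_cons] at hle ⊢
              simp only [List.length_cons] at hlen; omega)
        rw [aLoop] at this
        exact this
    | cons p rest =>
      obtain ⟨s, t⟩ := p
      by_cases hse : s ≤ e
      · rw [aLoop.eq_def]; dsimp only
        rw [if_pos hse]
        rw [bLoop_cons_le s t e ans rest h hse]
        exact ih rest (h ++ [(t, s)]) e ans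
          (by simp only [List.length_cons, List.length_append, List.length_nil] at hle ⊢; omega)
      · cases h with
        | nil =>
          rw [aLoop.eq_def]; dsimp only
          rw [if_neg hse]
          conv_rhs => rw [bLoop]
          rw [if_neg (by simp)]
          rw [show bAdmit e ((s, t) :: rest) [] = ((s, t) :: rest, []) from by simp [bAdmit, hse]]
          exact ih rest [] (s + t) (ans + t)
            (by simp only [List.length_cons, List.length_nil] at hle ⊢; omega)
        | cons x hs =>
          rw [aLoop.eq_def]; dsimp only
          rw [if_neg hse]
          conv_rhs => rw [bLoop]
          rw [if_neg (by simp)]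
          rw [show bAdmit e ((s, t) :: rest) (x :: hs) = ((s, t) :: rest, x :: hs) from by
            simp [bAdmit, hse]]
          have hlen := removeFirst_cons_length_lt x hs (minPair x hs) (minPair_mem hs x)
          exact ih ((s, t) :: rest) (removeFirst (x :: hs) (minPair x hs)) (e + (minPair x hs).1)
            (ans + (e - (minPair x hs).2) + (minPair x hs).1)
            (by simp only [List.length_cons] at hle hlen ⊢; omega)

-- ===== VERDICT (by name: the statement is the Claim_ definition above) =====
theorem solution_spec : Claim_equal_solution := by
  intro jobs _ _
  unfold Spec_solution solution solution_alt
  cases hms : (PySem.List.sorted jobs (fun j => j) false).map toJobPair with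
  | nil => rfl
  | cons p rest =>
    obtain ⟨s, t⟩ := p
    simp only []
    rw [loops_eq (2 * rest.length) rest [] (s + t) t (by simp)]
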